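-- pv_equiv track=rewrite | github.com/amake/TMX2Corpus | tokenizer.py | glom_multitags
-- ===== SOURCE A (Python) =====
-- def is_tag(token):
--     return len(token) > 2 and token[0] == '<' and token[-1] == '>'
--
-- def glom_multitags(tokens):
--     result = []
--     #print 'Before:', str(tokens)
--     tokens.reverse()
--     while len(tokens):
--         tok = tokens.pop()
--         if is_tag(tok) and len(tokens):
--             next_tok = tokens.pop()
--             if is_tag(next_tok):
--                 tokens.append(tok + next_tok)
--             else:
--                 result.append(tok)
--                 result.append(next_tok)
--         else:
--             result.append(tok)
--     #print 'After:', str(result)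
--     return result
-- ===== SOURCE B (Python) =====
-- def is_tag(token):
--     return len(token) > 2 and token[0] == '<' and token[-1] == '>'
--
-- def glom_multitags(tokens):
--     # Single accumulation pass with a running tag buffer; consumes `tokens`
--     # in place (emptied) just like the original.
--     result = []
--     buf = ''
--     tokens.reverse()
--     while tokens:
--         tok = tokens.pop()
--         if is_tag(tok):
--             buf += tok
--         else:
--             if buf:
--                 result.append(buf)
--                 buf = ''
--             result.append(tok)
--     if buf:
--         result.append(buf)
--     return result
-- ===== Notes on version B (the rewrite author's own statement) =====
-- stated objective: simpler
-- what changed: Instead of popping a second token and pushing a re-merged tag back onto the work list to be re-tested, B makes one accumulation pass with a running string buffer: tags are appended to the buffer, a non-tag flushes the buffer then is emitted, and a final flush handles a trailing tag run; tokens is still consumed in place.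
import Mathlib
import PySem

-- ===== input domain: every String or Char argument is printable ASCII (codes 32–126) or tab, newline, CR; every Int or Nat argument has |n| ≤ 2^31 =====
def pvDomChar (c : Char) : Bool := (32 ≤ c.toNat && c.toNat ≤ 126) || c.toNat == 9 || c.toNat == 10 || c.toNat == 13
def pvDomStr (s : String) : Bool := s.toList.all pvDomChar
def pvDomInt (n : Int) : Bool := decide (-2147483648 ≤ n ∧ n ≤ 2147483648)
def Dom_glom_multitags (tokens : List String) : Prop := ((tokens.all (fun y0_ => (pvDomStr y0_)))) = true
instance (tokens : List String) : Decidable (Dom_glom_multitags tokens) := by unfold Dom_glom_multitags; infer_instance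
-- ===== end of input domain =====

-- B replaces A's pop-two/push-merged-back-and-retest loop by a single buffered
-- accumulation pass (objective: simpler). Both Pythons empty `tokens` in place;
-- the equivalence proved here is about the return value.

-- ===== PORT A =====
-- is_tag: len(token) > 2 and token[0] == '<' and token[-1] == '>'
-- (indexing is guarded by the length check, so headD/getLastD are exact)
def pyIsTag (t : String) : Bool :=
  decide (t.toList.length > 2) && (t.toList.headD ' ' == '<') && (t.toList.getLastD ' ' == '>')

-- A's while loop pops from the END of the (reversed) Python list; we model the
-- Python list by its reverse, so pop() is head-cons and append(x) is cons.
def glomLoop : List String → List String → List String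
  | [], result => result
  | tok :: rest, result =>
    if pyIsTag tok && !rest.isEmpty then
      match rest with
      | [] => result ++ [tok]      -- unreachable (rest nonempty here)
      | next :: rest' =>
        if pyIsTag next then glomLoop ((tok ++ next) :: rest') result
        else glomLoop rest' (result ++ [tok, next])
    else glomLoop rest (result ++ [tok])
termination_by xs _ => xs.length
decreasing_by all_goals (simp; try omega)

-- tokens.reverse(); the loop then consumes (tokens.reverse).reverse head-first
def glom_multitags (tokens : List String) : List String :=
  glomLoop (tokens.reverse).reverse []

-- ===== PORT B =====
def glomAltLoop : List String → String → List String → List String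
  | [], buf, result => if buf == "" then result else result ++ [buf]
  | tok :: rest, buf, result =>
    if pyIsTag tok then glomAltLoop rest (buf ++ tok) result
    else glomAltLoop rest "" ((if buf == "" then result else result ++ [buf]) ++ [tok])

def glom_multitags_alt (tokens : List String) : List String :=
  glomAltLoop (tokens.reverse).reverse "" []

-- ===== PRECONDITION & SPEC =====
def Spec_glom_multitags (tokens : List String) (out : List String) : Prop := out = glom_multitags_alt tokens
instance (tokens : List String) (out : List String) : Decidable (Spec_glom_multitags tokens out) := by unfold Spec_glom_multitags; infer_instance

-- ===== CLAIM (what is proved, stated in full; the proofs are below) =====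
def Claim_equal_glom_multitags : Prop := ∀ (tokens : List String), Dom_glom_multitags tokens → Spec_glom_multitags tokens (glom_multitags tokens)

-- ===== LEMMAS AND PROOFS =====

theorem pyIsTag_ne_empty {b : String} (h : pyIsTag b = true) : (b == "") = false := by
  simp [pyIsTag] at h
  rcases h with ⟨⟨h1, _⟩, _⟩
  cases hb : (b == "") with
  | false => rfl
  | true =>
    have : b = "" := by simpa using hb
    subst this
    simp at h1

theorem pyIsTag_append {a b : String} (ha : pyIsTag a = true) (hb : pyIsTag b = true) :
    pyIsTag (a ++ b) = true := by
  simp [pyIsTag] at ha hb ⊢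
  rcases ha with ⟨⟨ha1, ha2⟩, _⟩
  rcases hb with ⟨⟨hb1, _⟩, hb3⟩
  have hane : a.toList ≠ [] := by
    intro h
    have := congrArg List.length h
    simp only [String.length_toList, List.length_nil] at this; omega
  have hbne : b.toList ≠ [] := by
    intro h
    have := congrArg List.length h
    simp only [String.length_toList, List.length_nil] at this; omega
  refine ⟨⟨by omega, ?_⟩, ?_⟩
  · rcases List.exists_cons_of_ne_nil hane with ⟨c, cs, hc⟩
    rw [hc]; rw [hc] at ha2; simpa using ha2
  · cases hgl : b.toList.getLast? with
    | none => exact absurd (List.getLast?_eq_none_iff.mp hgl) hbne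
    | some c => rw [hgl] at hb3; simpa using hb3

-- joint invariant: A's loop equals B's loop with empty buffer, and A's loop
-- with a tag on top equals B's loop with that tag as the buffer
theorem key : ∀ n (xs : List String), xs.length ≤ n →
    (∀ res, glomLoop xs res = glomAltLoop xs "" res) ∧
    (∀ b res, pyIsTag b = true → glomLoop (b :: xs) res = glomAltLoop xs b res) := by
  intro n
  induction n with
  | zero =>
    intro xs hxs
    have hx : xs = [] := List.eq_nil_of_length_eq_zero (Nat.le_zero.mp hxs)
    subst hx
    refine ⟨fun res => by simp [glomLoop, glomAltLoop], fun b res hb => ?_⟩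
    simp [glomLoop, glomAltLoop, hb, pyIsTag_ne_empty hb]
  | succ n ih =>
    intro xs hxs
    cases xs with
    | nil =>
      refine ⟨fun res => by simp [glomLoop, glomAltLoop], fun b res hb => ?_⟩
      simp [glomLoop, glomAltLoop, hb, pyIsTag_ne_empty hb]
    | cons t rest =>
      have hr : rest.length ≤ n := by simpa using Nat.succ_le_succ_iff.mp hxs
      refine ⟨fun res => ?_, fun b res hb => ?_⟩
      · cases ht : pyIsTag t with
        | true =>
          rw [(ih rest hr).2 t res ht]
          simp [glomAltLoop, ht]
        | false =>
          rw [glomLoop.eq_def]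
          simp only [ht, Bool.false_and]
          rw [(ih rest hr).1 (res ++ [t])]
          simp [glomAltLoop, ht]
      · cases ht : pyIsTag t with
        | true =>
          have hm := pyIsTag_append hb ht
          calc glomLoop (b :: t :: rest) res
              = glomLoop ((b ++ t) :: rest) res := by simp [glomLoop, hb, ht]
            _ = glomAltLoop rest (b ++ t) res := (ih rest hr).2 (b ++ t) res hm
            _ = glomAltLoop (t :: rest) b res := by simp [glomAltLoop, ht]
        | false =>
          calc glomLoop (b :: t :: rest) res
              = glomLoop rest (res ++ [b, t]) := by simp [glomLoop, hb, ht]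
            _ = glomAltLoop rest "" (res ++ [b, t]) := (ih rest hr).1 _
            _ = glomAltLoop (t :: rest) b res := by
                simp [glomAltLoop, ht, pyIsTag_ne_empty hb]

-- ===== VERDICT (by name: the statement is the Claim_ definition above) =====
theorem glom_multitags_spec : Claim_equal_glom_multitags := by
  intro tokens _
  unfold Spec_glom_multitags glom_multitags glom_multitags_alt
  exact (key _ _ (le_refl _)).1 []
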